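-- pv_equiv track=rewrite | github.com/celalalyaprak/data-structures-algorithms-playground | project-g3-000-dsa/athlete.py | format_paris_name
-- ===== SOURCE A (Python) =====
-- def format_paris_name(paris_name: str) -> str:
--     """
--     Convert Paris name format "LASTNAME Firstname" to "Firstname Lastname".
--     """
--     if not paris_name or not paris_name.strip():
--         return ""
--
--     parts = paris_name.strip().split()
--     if len(parts) < 2:
--         return paris_name.strip().title()
--
--     def is_lastname_part(part):
--         uppercase_count = sum(1 for c in part if c.isupper())
--         if uppercase_count >= 2:
--             return True
--         if part.isupper():
--             return True
--         if part.lower() in ['van', 'de', 'el', 'la', 'le', 'del', 'di', 'da', 'dos', 'das']: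
--             return True
--         return False
--
--     lastname_parts = []
--     firstname_parts = []
--     found_firstname = False
--
--     for part in parts:
--         if not found_firstname and is_lastname_part(part):
--             if part.lower() in ['van', 'de', 'el', 'la', 'le', 'del', 'di', 'da', 'dos', 'das']:
--                 lastname_parts.append(part.lower())
--             else:
--                 lastname_parts.append(part.title())
--         else:
--             found_firstname = True
--             firstname_parts.append(part)
--
--     if not firstname_parts:
--         if len(lastname_parts) >= 2:
--             return lastname_parts[-1] + " " + " ".join(lastname_parts[:-1])
--         return paris_name.strip()
--
--     lastname = " ".join(lastname_parts)
--     firstname = " ".join(firstname_parts)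
--
--     return firstname + " " + lastname if lastname else firstname
-- ===== SOURCE B (Python) =====
-- _PARTICLES = ('van', 'de', 'el', 'la', 'le', 'del', 'di', 'da', 'dos', 'das')
--
--
-- def _surnameish(word):
--     """One counting pass over the characters, then a single boolean formula."""
--     ups = lows = letters = 0
--     for c in word:
--         if c.isupper():
--             ups += 1
--         elif c.islower():
--             lows += 1
--         if c.isalpha():
--             letters += 1
--     return ups >= 2 or (letters > 0 and lows == 0) or word.lower() in _PARTICLES
--
--
-- def _format_surname(word):
--     low = word.lower()
--     return low if low in _PARTICLES else word.title()
--
--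
-- def _rearrange(words, racc):
--     """Recursively move surname-shaped words, formatted, onto a reversed accumulator
--     and build the final string at the base case."""
--     if words and _surnameish(words[0]):
--         return _rearrange(words[1:], [_format_surname(words[0])] + racc)
--     if words:
--         given = " ".join(words)
--         return given if not racc else " ".join([given, " ".join(reversed(racc))])
--     # every word was surname-shaped: rotate the final one to the front
--     return " ".join([racc[0], " ".join(reversed(racc[1:]))])
--
--
-- def format_paris_name(paris_name: str) -> str:
--     s = paris_name.strip()
--     if not s:
--         return ""
--     words = s.split()
--     if len(words) < 2:
--         return s.title()
--     return _rearrange(words, [])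
-- ===== Notes on version B (the rewrite author's own statement) =====
-- stated objective: alternative
-- what changed: Replaces A's flag-latched loop that fills two lists and then joins slices by a recursive descent that consumes words one at a time, pushes formatted surname words onto a REVERSED accumulator, and builds the final string directly at the base cases; the surname test is a single character-counting pass (uppercase/lowercase/letter counters) followed by one boolean formula instead of A's three-check cascade (sum-comprehension, str.isupper, particle list).
import Mathlib
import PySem

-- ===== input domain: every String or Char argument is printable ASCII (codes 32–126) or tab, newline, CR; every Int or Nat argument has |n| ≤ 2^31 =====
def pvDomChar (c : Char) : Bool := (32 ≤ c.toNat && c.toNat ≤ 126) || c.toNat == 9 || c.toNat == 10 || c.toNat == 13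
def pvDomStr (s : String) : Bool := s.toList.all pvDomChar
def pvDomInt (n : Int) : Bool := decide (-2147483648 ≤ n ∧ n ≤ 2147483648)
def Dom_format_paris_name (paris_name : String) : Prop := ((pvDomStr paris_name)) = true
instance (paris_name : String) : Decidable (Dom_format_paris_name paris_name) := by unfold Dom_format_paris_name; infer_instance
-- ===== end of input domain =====

-- B replaces A's flag-latched loop over two lists by a recursive descent with a reversed
-- accumulator that builds the result string at its base cases, and a counter-based surname test.

-- ===== PORT A =====
-- shared helpers: the particle literal and the built-ins .title()/.lower-membership,
-- which PySem does not provide (hand-ported; exact on the ASCII domain, where 'cased' = isalpha)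
def pvParticles : List String := ["van", "de", "el", "la", "le", "del", "di", "da", "dos", "das"]

-- Python str.title(): an alphabetic char is uppercased after a non-alphabetic char, lowercased otherwise (exact on ASCII)
def pvTitleChars : List Char → Bool → List Char
  | [], _ => []
  | c :: cs, prevAlpha =>
    (if PySem.Chars.isalpha c then
        (if prevAlpha then PySem.Chars.lowerChar c else PySem.Chars.upperChar c)
      else c) :: pvTitleChars cs (PySem.Chars.isalpha c)

def pvTitle (s : String) : String := String.ofList (pvTitleChars s.toList false)

-- Python str.isupper(): at least one cased char and no lowercase char (exact on ASCII)
def pvIsupper (s : String) : Bool :=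
  s.toList.any PySem.Chars.isalpha && s.toList.all (fun c => !PySem.Chars.islower c)

-- A's helper is_lastname_part: three checks in a cascade
def isLastnamePart (part : String) : Bool :=
  if (part.toList.filter PySem.Chars.isupper).length ≥ 2 then true
  else if pvIsupper part then true
  else if pvParticles.contains (PySem.Str.lower part) then true
  else false

-- the body of A's for-loop: state = (lastname_parts, firstname_parts, found_firstname)
def pvStep (st : List String × List String × Bool) (part : String) : List String × List String × Bool :=
  if !st.2.2 && isLastnamePart part then
    if pvParticles.contains (PySem.Str.lower part) then
      (st.1 ++ [PySem.Str.lower part], st.2.1, st.2.2)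
    else
      (st.1 ++ [pvTitle part], st.2.1, st.2.2)
  else (st.1, st.2.1 ++ [part], true)

-- A: single loop over parts with a found_firstname latch carried in the fold state
def format_paris_name (paris_name : String) : String :=
  if paris_name = "" ∨ PySem.Str.strip paris_name = "" then ""
  else
    let parts := PySem.Str.split₀ (PySem.Str.strip paris_name)
    if parts.length < 2 then pvTitle (PySem.Str.strip paris_name)
    else
      let st := parts.foldl pvStep ([], [], false)
      if st.2.1 = [] then
        if st.1.length ≥ 2 then
          PySem.Str.join " " [PySem.List.pyGetD st.1 (-1) "", PySem.Str.join " " (PySem.List.slice st.1 none (some (-1)))]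
        else PySem.Str.strip paris_name
      else
        if PySem.Str.join " " st.1 = "" then PySem.Str.join " " st.2.1
        else PySem.Str.join " " [PySem.Str.join " " st.2.1, PySem.Str.join " " st.1]

-- ===== PORT B =====
-- Source B's _surnameish: one counting pass over the characters (ups, lows, letters), then one formula
def pvScanStep (st : Int × Int × Int) (c : Char) : Int × Int × Int :=
  let st1 :=
    if PySem.Chars.isupper c then (st.1 + 1, st.2.1, st.2.2)
    else if PySem.Chars.islower c then (st.1, st.2.1 + 1, st.2.2)
    else st
  if PySem.Chars.isalpha c then (st1.1, st1.2.1, st1.2.2 + 1) else st1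

def pvSurnameish (w : String) : Bool :=
  let st := w.toList.foldl pvScanStep (0, 0, 0)
  decide (2 ≤ st.1) || (decide (0 < st.2.2) && decide (st.2.1 = 0))
    || pvParticles.contains (PySem.Str.lower w)

-- Source B's _format_surname
def pvFmt (word : String) : String :=
  if pvParticles.contains (PySem.Str.lower word) then PySem.Str.lower word else pvTitle word

-- Source B's _rearrange: recursion with a reversed accumulator, output built at the base cases
-- ('x + " " + y' is ported as '" ".join [x, y]', the same string; racc[0] on an empty racc would
-- raise IndexError in Python — that call never happens, the [] , [] case is dead code returning "")
def pvRearrange : List String → List String → String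
  | w :: ws, racc =>
    if pvSurnameish w then
      pvRearrange ws (pvFmt w :: racc)
    else
      let given := PySem.Str.join " " (w :: ws)
      if racc = [] then given
      else PySem.Str.join " " [given, PySem.Str.join " " racc.reverse]
  | [], racc =>
    match racc with
    | r0 :: rs => PySem.Str.join " " [r0, PySem.Str.join " " rs.reverse]
    | [] => ""

def format_paris_name_alt (paris_name : String) : String :=
  let s := PySem.Str.strip paris_name
  if s = "" then ""
  else
    let words := PySem.Str.split₀ s
    if words.length < 2 then pvTitle s
    else pvRearrange words []

-- ===== PRECONDITION & SPEC =====
def Spec_format_paris_name (paris_name : String) (out : String) : Prop := out = format_paris_name_alt paris_name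
instance (paris_name : String) (out : String) : Decidable (Spec_format_paris_name paris_name out) := by unfold Spec_format_paris_name; infer_instance

-- ===== CLAIM =====
def Claim_equal_format_paris_name : Prop := ∀ (paris_name : String), Dom_format_paris_name paris_name → Spec_format_paris_name paris_name (format_paris_name paris_name)

-- ===== LEMMAS AND PROOFS =====

-- the counting pass, characterized by countP
lemma pvScan_spec (cs : List Char) : ∀ u l a : Int,
    cs.foldl pvScanStep (u, l, a)
      = (u + cs.countP PySem.Chars.isupper,
         l + cs.countP (fun c => !PySem.Chars.isupper c && PySem.Chars.islower c),
         a + cs.countP PySem.Chars.isalpha) := by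
  induction cs with
  | nil => intro u l a; simp
  | cons c cs ih =>
    intro u l a
    rw [List.foldl_cons]
    by_cases hu : PySem.Chars.isupper c = true
    · have ha : PySem.Chars.isalpha c = true := by
        simp [PySem.Chars.isalpha, hu]
      simp [pvScanStep, hu, ha, ih]
      constructor <;> ring
    · by_cases hl : PySem.Chars.islower c = true
      · have ha : PySem.Chars.isalpha c = true := by
          simp [PySem.Chars.isalpha, hl]
        simp [pvScanStep, hu, hl, ha, ih]
        constructor <;> ring
      · have ha : PySem.Chars.isalpha c = false := by
          simp [PySem.Chars.isalpha, hu, hl]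
        simp [pvScanStep, hu, hl, ha, ih]

lemma pvLower_not_upper (c : Char) (h : PySem.Chars.islower c = true) :
    PySem.Chars.isupper c = false := by
  apply Bool.eq_false_iff.mpr
  intro hu
  simp only [PySem.Chars.islower, PySem.Chars.isupper, Bool.and_eq_true, decide_eq_true_eq,
    Char.le_def, UInt32.le_iff_toNat_le] at h hu
  have e1 : 'a'.val.toNat = 97 := rfl
  have e2 : 'z'.val.toNat = 122 := rfl
  have e3 : 'A'.val.toNat = 65 := rfl
  have e4 : 'Z'.val.toNat = 90 := rfl
  omega

-- B's counter formula equals A's cascade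
lemma pvSurnameish_eq (w : String) : pvSurnameish w = isLastnamePart w := by
  unfold pvSurnameish isLastnamePart
  rw [pvScan_spec]
  simp only [zero_add]
  by_cases h1 : (w.toList.filter PySem.Chars.isupper).length ≥ 2
  · have : (2 : Int) ≤ w.toList.countP PySem.Chars.isupper := by
      rw [List.countP_eq_length_filter]; exact_mod_cast h1
    simp [this, h1]
  · have h1' : ¬ (2 : Int) ≤ w.toList.countP PySem.Chars.isupper := by
      rw [List.countP_eq_length_filter]; intro h; exact h1 (by exact_mod_cast h)
    simp only [if_neg h1, h1', decide_false, Bool.false_or]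
    have hmid : (decide ((0:Int) < w.toList.countP PySem.Chars.isalpha)
        && decide ((w.toList.countP (fun c => !PySem.Chars.isupper c && PySem.Chars.islower c) : Int) = 0))
        = pvIsupper w := by
      unfold pvIsupper
      rw [Bool.eq_iff_iff]
      simp only [Bool.and_eq_true, decide_eq_true_eq, List.any_eq_true, List.all_eq_true]
      constructor
      · rintro ⟨hpos, hzero⟩
        have hpos' : 0 < w.toList.countP PySem.Chars.isalpha := by exact_mod_cast hpos
        have hzero' : w.toList.countP (fun c => !PySem.Chars.isupper c && PySem.Chars.islower c) = 0 := by
          exact_mod_cast hzero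
        refine ⟨List.countP_pos_iff.mp hpos', ?_⟩
        intro x hx
        have hnx := List.countP_eq_zero.mp hzero' x hx
        rcases Bool.eq_false_or_eq_true (PySem.Chars.islower x) with h | h
        · exact absurd (by simp [h, pvLower_not_upper x h]) hnx
        · simp [h]
      · rintro ⟨⟨x, hx, hpx⟩, hall⟩
        constructor
        · exact_mod_cast List.countP_pos_iff.mpr ⟨x, hx, hpx⟩
        · have : w.toList.countP (fun c => !PySem.Chars.isupper c && PySem.Chars.islower c) = 0 := by
            rw [List.countP_eq_zero]
            intro y hy
            have := hall y hy
            simp at this ⊢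
            intro _
            exact this
          exact_mod_cast this
    rw [hmid]
    rcases Bool.eq_false_or_eq_true (pvIsupper w) with h2 | h2 <;>
      rcases Bool.eq_false_or_eq_true (pvParticles.contains (PySem.Str.lower w)) with h3 | h3 <;>
      simp [h2, h3]

-- the assembly both sides reduce to: reversed accumulator racc, remaining words first
def pvAsmR (racc first : List String) : String :=
  match first with
  | [] =>
    match racc with
    | r0 :: rs => PySem.Str.join " " [r0, PySem.Str.join " " rs.reverse]
    | [] => ""
  | w :: ws =>
    let given := PySem.Str.join " " (w :: ws)
    if racc = [] then given
    else PySem.Str.join " " [given, PySem.Str.join " " racc.reverse]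

-- B's recursion, closed form
lemma pvRearrange_eq (ws : List String) : ∀ racc : List String,
    pvRearrange ws racc
      = pvAsmR (((ws.takeWhile isLastnamePart).map pvFmt).reverse ++ racc)
               (ws.dropWhile isLastnamePart) := by
  induction ws with
  | nil => intro racc; simp [pvRearrange, pvAsmR]
  | cons w ws ih =>
    intro racc
    by_cases h : isLastnamePart w = true
    · have hs : pvSurnameish w = true := by rw [pvSurnameish_eq]; exact h
      rw [pvRearrange, if_pos hs, ih, List.takeWhile_cons_of_pos h, List.dropWhile_cons_of_pos h]
      simp [List.append_assoc]
    · have hs : pvSurnameish w = false := by rw [pvSurnameish_eq]; exact Bool.eq_false_iff.mpr h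
      rw [pvRearrange, if_neg (by simp [hs]), List.takeWhile_cons_of_neg h,
          List.dropWhile_cons_of_neg h]
      simp [pvAsmR]

-- A's fold, closed form in the same vocabulary
lemma pvFold_true (parts : List String) (ln fn : List String) :
    parts.foldl pvStep (ln, fn, true) = (ln, fn ++ parts, true) := by
  induction parts generalizing fn with
  | nil => simp
  | cons p ps ih => simp [pvStep, ih]

lemma pvFold_false (parts : List String) (ln fn : List String) :
    parts.foldl pvStep (ln, fn, false)
      = (ln ++ (parts.takeWhile isLastnamePart).map pvFmt,
         fn ++ parts.dropWhile isLastnamePart,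
         !parts.all isLastnamePart) := by
  induction parts generalizing ln with
  | nil => simp
  | cons p ps ih =>
    by_cases h : isLastnamePart p = true
    · have hstep : pvStep (ln, fn, false) p = (ln ++ [pvFmt p], fn, false) := by
        simp only [pvStep, pvFmt, h, Bool.not_false, Bool.true_and, if_true]
        split_ifs <;> rfl
      rw [List.foldl_cons, hstep, ih]
      simp [List.takeWhile_cons_of_pos h, List.dropWhile_cons_of_pos h, h, List.append_assoc]
    · rw [List.foldl_cons]
      have hstep : pvStep (ln, fn, false) p = (ln, fn ++ [p], true) := by
        simp [pvStep, h]
      rw [hstep, pvFold_true]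
      have hpf : isLastnamePart p = false := Bool.eq_false_iff.mpr h
      simp [hpf]

-- nonemptiness of the formatted words (needed to translate A's 'join = ""' test)
lemma pvTitle_ne_empty (p : String) (hp : p ≠ "") : pvTitle p ≠ "" := by
  intro h
  apply hp
  rw [← String.toList_eq_nil_iff] at h ⊢
  rw [pvTitle, String.toList_ofList] at h
  cases hl : p.toList with
  | nil => rfl
  | cons c cs => rw [hl] at h; simp [pvTitleChars] at h

lemma pvLower_ne_empty (p : String) (hp : p ≠ "") : PySem.Str.lower p ≠ "" := by
  intro h
  apply hp
  rw [← String.toList_eq_nil_iff] at h ⊢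
  rw [PySem.Str.toList_lower, PySem.Chars.lower, List.map_eq_nil_iff] at h
  exact h

lemma pvFmt_ne_empty (p : String) (hp : isLastnamePart p = true) : pvFmt p ≠ "" := by
  have hne : p ≠ "" := by
    rintro rfl
    have : isLastnamePart "" = false := by decide
    rw [this] at hp; exact Bool.false_ne_true hp
  unfold pvFmt
  split
  · exact pvLower_ne_empty p hne
  · exact pvTitle_ne_empty p hne

lemma pvJoin_ne_empty (a : String) (rest : List String) (ha : a ≠ "") :
    PySem.Str.join " " (a :: rest) ≠ "" := by
  intro h
  rw [← String.toList_eq_nil_iff, PySem.Str.toList_join] at h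
  cases rest with
  | nil =>
    rw [List.map_cons, List.map_nil, PySem.Chars.join_singleton] at h
    exact ha (String.toList_eq_nil_iff.mp h)
  | cons b t =>
    rw [List.map_cons, List.map_cons, PySem.Chars.join_cons_cons] at h
    simp at h

-- ===== VERDICT (by name: the statement is the Claim_ definition above) =====
theorem format_paris_name_spec : Claim_equal_format_paris_name := by
  intro paris_name _
  unfold Spec_format_paris_name format_paris_name format_paris_name_alt
  obtain ⟨w, hw⟩ : ∃ w, PySem.Str.strip paris_name = w := ⟨_, rfl⟩
  by_cases h0 : paris_name = "" ∨ PySem.Str.strip paris_name = ""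
  · have hs : w = "" := by
      rcases h0 with rfl | h
      · rw [← hw]; decide
      · rw [← hw]; exact h
    rw [if_pos h0, hw, hs]
    simp
  · have hs' : ¬ w = "" := by rw [← hw]; exact fun h => h0 (Or.inr h)
    rw [if_neg h0, hw]
    obtain ⟨parts, hp⟩ : ∃ p, PySem.Str.split₀ w = p := ⟨_, rfl⟩
    simp only [hp, if_neg hs']
    by_cases hlen : parts.length < 2
    · rw [if_pos hlen, if_pos hlen]
    · rw [if_neg hlen, if_neg hlen, pvFold_false, pvRearrange_eq, List.append_nil]
      simp only [List.nil_append]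
      set mapped := (parts.takeWhile isLastnamePart).map pvFmt with hm
      set first := parts.dropWhile isLastnamePart with hf
      have hmem_ne : ∀ x ∈ mapped, x ≠ "" := by
        intro x hx
        rcases List.mem_map.mp hx with ⟨p, hpmem, rfl⟩
        exact pvFmt_ne_empty p (List.mem_takeWhile_imp hpmem)
      by_cases hfe : first = []
      · -- every word looked like a lastname: the rotation branch
        have htake : parts.takeWhile isLastnamePart = parts := by
          have hall : ∀ x ∈ parts, isLastnamePart x = true := by
            intro x hx
            by_contra hcx
            have : first ≠ [] := by
              rw [hf]
              intro hnil
              have := List.dropWhile_eq_nil_iff.mp hnil x hx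
              exact hcx this
            exact this hfe
          exact List.takeWhile_eq_self_iff.mpr hall
        have hml : mapped.length = parts.length := by rw [hm, htake, List.length_map]
        have hmne : mapped ≠ [] := by
          intro h
          rw [h] at hml
          simp at hml
          omega
        have hlast_len : mapped.length ≥ 2 := by omega
        rw [if_pos hfe, if_pos hlast_len]
        unfold pvAsmR
        rw [hfe]
        have hsplit : mapped = mapped.dropLast ++ [mapped.getLast hmne] :=
          (List.dropLast_append_getLast hmne).symm
        have hrev : mapped.reverse = mapped.getLast hmne :: mapped.dropLast.reverse := by
          conv_lhs => rw [hsplit]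
          simp
        rw [hrev]
        simp only
        rw [PySem.List.pyGetD_neg_one mapped "" hmne, PySem.List.slice_to_neg_one,
            List.reverse_reverse]
      · -- a firstname exists
        rw [if_neg hfe]
        unfold pvAsmR
        cases hfc : first with
        | nil => exact absurd hfc hfe
        | cons fw fws =>
          simp only
          by_cases hme : mapped = []
          · rw [hme]
            have hj : PySem.Str.join " " ([] : List String) = "" := by decide
            simp [hj]
          · have hne : PySem.Str.join " " mapped ≠ "" := by
              cases hl : mapped with
              | nil => exact absurd hl hme
              | cons a rest =>
                exact pvJoin_ne_empty a rest (hmem_ne a (hl ▸ List.mem_cons_self))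
            have hrne : mapped.reverse ≠ [] := by simp [hme]
            rw [if_neg hne, if_neg hrne, List.reverse_reverse]
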